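-- pv_equiv track=rewrite | github.com/ANTL-KJH/Python-CodingTest | 프로그래머스/0/181908. 접미사인지 확인하기/접미사인지 확인하기.py | solution
-- ===== SOURCE A (Python) =====
-- def solution(my_string, is_suffix):
--     answer = 1
--     if len(my_string)>=len(is_suffix):
--         for i in range(-1,-len(is_suffix)-1, -1):
--             if my_string[i] != is_suffix[i]:
--                 answer = 0
--                 break
--     else:
--         answer = 0
--     return answer
-- ===== SOURCE B (Python) =====
-- def solution(my_string, is_suffix):
--     # Reverse both strings and test "reversed suffix is a prefix of reversed string".
--     rev = my_string[::-1]
--     return int(rev[:len(is_suffix)] == is_suffix[::-1])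
-- ===== Notes on version B (the rewrite author's own statement) =====
-- stated objective: alternative
-- what changed: Replaced the per-character reverse-negative-indexed Python loop (with break and length guard) by reversing both strings once and testing whether the reversed suffix is a prefix of the reversed string via one slice-and-compare (C-level slicing/equality instead of an interpreted loop).
import Mathlib
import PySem

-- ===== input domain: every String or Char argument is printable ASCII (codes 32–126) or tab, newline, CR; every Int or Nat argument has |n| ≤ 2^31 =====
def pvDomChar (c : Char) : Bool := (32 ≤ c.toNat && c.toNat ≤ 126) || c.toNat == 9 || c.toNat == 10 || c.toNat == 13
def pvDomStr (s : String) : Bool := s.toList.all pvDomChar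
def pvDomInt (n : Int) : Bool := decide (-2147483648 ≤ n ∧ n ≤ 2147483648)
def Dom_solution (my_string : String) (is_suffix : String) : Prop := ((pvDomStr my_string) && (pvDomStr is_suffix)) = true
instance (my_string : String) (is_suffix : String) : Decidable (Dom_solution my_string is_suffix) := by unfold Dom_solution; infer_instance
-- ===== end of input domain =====

-- B reverses both strings once and tests "reversed suffix is a prefix of reversed string"
-- by a single slice-and-compare, instead of A's reverse-negative-indexed comparison loop
-- with break (alternative decomposition; same cost class).


-- ===== PORT A =====
-- the for-loop with break; answer starts at 1, becomes 0 on the first mismatch.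
-- Indexing uses pyGetD: under the length guard every index i ∈ [-len(t), -1] is in
-- range for both strings, so the default ' ' is never read and this is exact.
def solutionLoop (s t : List Char) : List Int → Int
  | [] => 1
  | i :: rest =>
    if PySem.List.pyGetD s i ' ' ≠ PySem.List.pyGetD t i ' ' then 0
    else solutionLoop s t rest

def solution (my_string : String) (is_suffix : String) : Int :=
  if PySem.Str.len my_string ≥ PySem.Str.len is_suffix then
    solutionLoop my_string.toList is_suffix.toList
      (PySem.List.pyRange (-1) (-(PySem.Str.len is_suffix) - 1) (-1))
  else 0

-- ===== PORT B =====
-- rev = my_string[::-1]; return int(rev[:len(is_suffix)] == is_suffix[::-1])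
-- ([::-1] with step -1 always succeeds in Python, so .getD [] never supplies the default)
def solution_alt (my_string : String) (is_suffix : String) : Int :=
  let rev := (PySem.List.slice? my_string.toList none none (-1)).getD []
  let revSuf := (PySem.List.slice? is_suffix.toList none none (-1)).getD []
  if PySem.List.slice rev none (some (PySem.Str.len is_suffix)) = revSuf then 1 else 0

-- ===== PRECONDITION & SPEC =====
def Spec_solution (my_string : String) (is_suffix : String) (out : Int) : Prop := out = solution_alt my_string is_suffix
instance (my_string : String) (is_suffix : String) (out : Int) : Decidable (Spec_solution my_string is_suffix out) := by unfold Spec_solution; infer_instance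

-- ===== CLAIM (what is proved, stated in full; the proofs are below) =====
def Claim_equal_solution : Prop := ∀ (my_string : String) (is_suffix : String), Dom_solution my_string is_suffix → Spec_solution my_string is_suffix (solution my_string is_suffix)

-- ===== LEMMAS AND PROOFS =====

-- the break-loop returns 1 iff every compared pair of characters agrees
lemma solutionLoop_eq (s t : List Char) (l : List Int) :
    solutionLoop s t l =
      if ∀ i ∈ l, PySem.List.pyGetD s i ' ' = PySem.List.pyGetD t i ' ' then 1 else 0 := by
  induction l with
  | nil => simp [solutionLoop]
  | cons i rest ih =>
    by_cases h : PySem.List.pyGetD s i ' ' = PySem.List.pyGetD t i ' ' <;>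
      simp [solutionLoop, h, ih]

-- range(-1, -m-1, -1) enumerates -1, -2, …, -m
lemma pyRange_neg (m : Nat) :
    PySem.List.pyRange (-1) (-(m : Int) - 1) (-1) =
      (List.range m).map (fun k : Nat => (-1 - (k : Int))) := by
  rcases Nat.eq_zero_or_pos m with h | h
  · subst h; simp [PySem.List.pyRange]
  · have h1 : (-(m : Int) - 1 < -1) := by omega
    have h2 : (((-1 : Int) - (-(m : Int) - 1) + - -1 - 1) / - -1).toNat = m := by
      norm_num; omega
    simp only [PySem.List.pyRange, if_neg (by norm_num : ¬ ((-1 : Int) = 0)),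
      if_neg (by norm_num : ¬ ((0 : Int) < -1)), if_pos h1, h2]
    exact List.map_congr_left (fun k _ => by ring)

-- the character-by-character condition over negative indices is exactly "t is a suffix of s"
lemma all_neg_eq_iff_suffix (s t : List Char) (h : t.length ≤ s.length) :
    (∀ k < t.length, PySem.List.pyGetD s (-1 - (k : Int)) ' ' = PySem.List.pyGetD t (-1 - (k : Int)) ' ')
      ↔ t <:+ s := by
  rw [List.suffix_iff_eq_drop]
  constructor
  · intro hall
    apply Eq.symm
    apply List.ext_getElem
    · simp [List.length_drop]; omega
    · intro j h1 h2
      have hj : j < t.length := by simpa using h2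
      have hk := hall (t.length - 1 - j) (by omega)
      rw [show (-1 - ((t.length - 1 - j : Nat) : Int)) = -(((t.length - j : Nat)) : Int) by omega] at hk
      rw [PySem.List.pyGetD_neg_natCast s _ _ (by omega) (by omega),
          PySem.List.pyGetD_neg_natCast t _ _ (by omega) (by omega)] at hk
      have hk2 : s[s.length - (t.length - j)]? = t[t.length - (t.length - j)]? := by
        rw [List.getElem?_eq_getElem (by omega), List.getElem?_eq_getElem (by omega), hk]
      rw [show t.length - (t.length - j) = j from by omega,
          show s.length - (t.length - j) = s.length - t.length + j from by omega] at hk2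
      rw [List.getElem_drop]
      rw [List.getElem?_eq_getElem (by omega), List.getElem?_eq_getElem (by omega)] at hk2
      exact Option.some_inj.mp hk2
  · intro hd k hk
    rw [show (-1 - (k : Int)) = -(((k + 1 : Nat)) : Int) by omega]
    rw [PySem.List.pyGetD_neg_natCast s _ _ (by omega) (by omega),
        PySem.List.pyGetD_neg_natCast t _ _ (by omega) (by omega)]
    have hj : t.length - (k + 1) < t.length := by omega
    have := congrArg (fun l => l[t.length - (k + 1)]?) hd
    simp only [List.getElem?_drop] at this
    rw [List.getElem?_eq_getElem hj] at this
    have hs : s.length - t.length + (t.length - (k + 1)) = s.length - (k + 1) := by omega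
    rw [hs, List.getElem?_eq_getElem (by omega)] at this
    exact (Option.some_inj.mp this).symm

-- B's reverse-then-prefix test decides exactly "t is a suffix of s"
lemma take_reverse_eq_iff_suffix (s t : List Char) :
    (s.reverse.take t.length = t.reverse) ↔ t <:+ s := by
  rw [← List.reverse_prefix]
  constructor
  · intro h; rw [← h]; exact List.take_prefix _ _
  · intro h
    have := List.prefix_iff_eq_take.mp h
    rw [List.length_reverse] at this
    exact this.symm

-- ===== VERDICT (by name: the statement is the Claim_ definition above) =====
theorem solution_spec : Claim_equal_solution := by
  intro ms sf _
  unfold Spec_solution solution solution_alt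
  simp only [PySem.List.slice?_none_none_neg_one, Option.getD_some]
  have hlen0 : (0 : Int) ≤ PySem.Str.len sf := by rw [PySem.Str.len_eq]; positivity
  rw [PySem.List.slice_to (hb := hlen0)]
  have htn : (PySem.Str.len sf).toNat = sf.toList.length := by
    rw [PySem.Str.len_eq]; exact Int.toNat_natCast _
  rw [htn]
  rw [if_congr (take_reverse_eq_iff_suffix ms.toList sf.toList) rfl rfl]
  by_cases hlen : PySem.Str.len ms ≥ PySem.Str.len sf
  · have hle : sf.toList.length ≤ ms.toList.length := by
      have := hlen; simp [PySem.Str.len_eq] at this; exact_mod_cast this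
    rw [if_pos hlen, PySem.Str.len_eq, pyRange_neg, solutionLoop_eq]
    have hiff : (∀ i ∈ (List.range sf.toList.length).map (fun k : Nat => (-1 - (k : Int))),
        PySem.List.pyGetD ms.toList i ' ' = PySem.List.pyGetD sf.toList i ' ') ↔
        (∀ k < sf.toList.length,
          PySem.List.pyGetD ms.toList (-1 - (k : Int)) ' ' = PySem.List.pyGetD sf.toList (-1 - (k : Int)) ' ') := by
      rw [List.forall_mem_map]
      exact ⟨fun hall k hk => hall k (List.mem_range.mpr hk),
             fun hall k hk => hall k (List.mem_range.mp hk)⟩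
    rw [if_congr (hiff.trans (all_neg_eq_iff_suffix ms.toList sf.toList hle)) rfl rfl]
  · have hgt : ms.toList.length < sf.toList.length := by
      simp [PySem.Str.len_eq] at hlen; exact_mod_cast hlen
    rw [if_neg hlen]
    have hns : ¬ sf.toList <:+ ms.toList := fun hb => by
      have := hb.length_le; omega
    rw [if_neg hns]
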